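-- pv_equiv track=rewrite | github.com/linhdvu14/cp-sols | sols/Google/CodeJam/2019/2019_1B/A_Manhattan_Crepe_Cart.py | solve
-- ===== SOURCE A (Python) =====
-- def count_x(x0,points):
-- 	return sum(1 for x,y,d in points if (d=='E' and x0>x) or (d=='W' and x0<x))
--
-- def count_y(y0,points):
-- 	return sum(1 for x,y,d in points if (d=='N' and y0>y) or (d=='S' and y0<y))
--
-- def solve(p,q,points):
-- 	px, py, mx, my = 0, 0, count_x(0,points), count_y(0,points)
--
-- 	for x,y,_ in points:
-- 		for d in range(-1,2,1):
-- 			if 0 <= x+d <= q: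
-- 				cnt = count_x(x+d,points)
-- 				if mx < cnt or (mx == cnt and px > x+d):
-- 					px, mx = x+d, cnt
-- 			if 0 <= y+d <= q:
-- 				cnt = count_y(y+d,points)
-- 				if my < cnt or (my == cnt and py > y+d):
-- 					py, my = y+d, cnt
-- 	return px, py
-- ===== SOURCE B (Python) =====
-- def solve(p, q, points):
--     # Sweep line instead of A's quadratic rescan: per axis every person becomes a
--     # +1/-1 step event; events are sorted by position once and scanned with a
--     # running count, recording a position at the end of each equal-key group;
--     # the first group reaching the maximum wins (smallest-position tie-break).
--     M = q if q > 0 else 0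
--
--     def axis(events, base):
--         evts = sorted(events, key=lambda e: e[0])
--         cur, best_pos, best_cnt = base, 0, base
--         for i, (k, d) in enumerate(evts):
--             cur += d
--             if (i + 1 == len(evts) or evts[i + 1][0] != k) and cur > best_cnt:
--                 best_pos, best_cnt = k, cur
--         return best_pos
--
--     ex, ey, bx, by = [], [], 0, 0
--     for x, y, d in points:
--         if d == 'E':
--             k = x + 1
--             if k <= 0:
--                 bx += 1
--             elif k <= M:
--                 ex.append((k, 1))
--         elif d == 'W':
--             if x > 0:
--                 bx += 1
--                 if x <= M:
--                     ex.append((x, -1))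
--         elif d == 'N':
--             k = y + 1
--             if k <= 0:
--                 by += 1
--             elif k <= M:
--                 ey.append((k, 1))
--         elif d == 'S':
--             if y > 0:
--                 by += 1
--                 if y <= M:
--                     ey.append((y, -1))
--     return axis(ex, bx), axis(ey, by)
-- ===== Notes on version B (the rewrite author's own statement) =====
-- stated objective: faster
-- what changed: Replaces A's O(P^2) re-count of people at every candidate position with a per-axis sweep line: each person becomes a +1/-1 step event, events are sorted once and scanned with a running count, taking the first (smallest) position that reaches the maximum.
import Mathlib
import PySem

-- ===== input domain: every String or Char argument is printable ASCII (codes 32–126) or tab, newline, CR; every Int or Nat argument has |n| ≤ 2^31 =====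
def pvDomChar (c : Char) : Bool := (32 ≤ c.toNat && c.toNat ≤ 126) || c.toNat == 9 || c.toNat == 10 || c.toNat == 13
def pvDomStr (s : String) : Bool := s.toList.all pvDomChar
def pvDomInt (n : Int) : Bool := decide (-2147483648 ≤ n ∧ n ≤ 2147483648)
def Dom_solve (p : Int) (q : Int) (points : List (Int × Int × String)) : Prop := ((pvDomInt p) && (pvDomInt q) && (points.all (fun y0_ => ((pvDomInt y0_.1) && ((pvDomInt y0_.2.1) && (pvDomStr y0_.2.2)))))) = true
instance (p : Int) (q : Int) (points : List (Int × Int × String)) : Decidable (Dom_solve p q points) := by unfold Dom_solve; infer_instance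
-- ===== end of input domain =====

-- B replaces A's quadratic candidate re-count by a per-axis sorted sweep over +1/-1 step events (asymptotically faster).


-- ===== PORT A =====
def count_x (x0 : Int) (points : List (Int × Int × String)) : Int :=
  points.foldl (fun acc pt =>
    if (pt.2.2 = "E" ∧ x0 > pt.1) ∨ (pt.2.2 = "W" ∧ x0 < pt.1) then acc + 1 else acc) 0

def count_y (y0 : Int) (points : List (Int × Int × String)) : Int :=
  points.foldl (fun acc pt =>
    if (pt.2.2 = "N" ∧ y0 > pt.2.1) ∨ (pt.2.2 = "S" ∧ y0 < pt.2.1) then acc + 1 else acc) 0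

def solve (p : Int) (q : Int) (points : List (Int × Int × String)) : Int × Int :=
  let res := points.foldl (fun (st : Int × Int × Int × Int) pt =>
    (PySem.List.pyRange (-1) 2 1).foldl (fun (st2 : Int × Int × Int × Int) d =>
      let st3 : Int × Int × Int × Int :=
        if 0 ≤ pt.1 + d ∧ pt.1 + d ≤ q then
          let cnt := count_x (pt.1 + d) points
          if st2.2.2.1 < cnt ∨ (st2.2.2.1 = cnt ∧ st2.1 > pt.1 + d) then
            (pt.1 + d, st2.2.1, cnt, st2.2.2.2)
          else st2
        else st2
      if 0 ≤ pt.2.1 + d ∧ pt.2.1 + d ≤ q then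
        let cnt := count_y (pt.2.1 + d) points
        if st3.2.2.2 < cnt ∨ (st3.2.2.2 = cnt ∧ st3.2.1 > pt.2.1 + d) then
          (st3.1, pt.2.1 + d, st3.2.2.1, cnt)
        else st3
      else st3) st) (0, 0, count_x 0 points, count_y 0 points)
  (res.1, res.2.1)

-- ===== PORT B =====
-- the scan of Source B's `axis` loop: lookahead `evts[i+1][0] != k` is the head of `rest`
def sweepGo (cur bp bc : Int) : List (Int × Int) → Int
  | [] => bp
  | (k, d) :: rest =>
      let cur' := cur + d
      let closes : Bool := match rest with | [] => true | e2 :: _ => e2.1 != k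
      if closes ∧ cur' > bc then sweepGo cur' k cur' rest
      else sweepGo cur' bp bc rest

def solveAltAxis (events : List (Int × Int)) (base : Int) : Int :=
  sweepGo base 0 base (PySem.List.sorted events Prod.fst false)

def solve_alt (p : Int) (q : Int) (points : List (Int × Int × String)) : Int × Int :=
  let M := if q > 0 then q else 0
  let acc := points.foldl (fun (st : List (Int × Int) × List (Int × Int) × Int × Int) pt =>
      if pt.2.2 = "E" then
        if pt.1 + 1 ≤ 0 then (st.1, st.2.1, st.2.2.1 + 1, st.2.2.2)
        else if pt.1 + 1 ≤ M then (st.1 ++ [(pt.1 + 1, 1)], st.2.1, st.2.2.1, st.2.2.2)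
        else st
      else if pt.2.2 = "W" then
        if pt.1 > 0 then
          if pt.1 ≤ M then (st.1 ++ [(pt.1, -1)], st.2.1, st.2.2.1 + 1, st.2.2.2)
          else (st.1, st.2.1, st.2.2.1 + 1, st.2.2.2)
        else st
      else if pt.2.2 = "N" then
        if pt.2.1 + 1 ≤ 0 then (st.1, st.2.1, st.2.2.1, st.2.2.2 + 1)
        else if pt.2.1 + 1 ≤ M then (st.1, st.2.1 ++ [(pt.2.1 + 1, 1)], st.2.2.1, st.2.2.2)
        else st
      else if pt.2.2 = "S" then
        if pt.2.1 > 0 then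
          if pt.2.1 ≤ M then (st.1, st.2.1 ++ [(pt.2.1, -1)], st.2.2.1, st.2.2.2 + 1)
          else (st.1, st.2.1, st.2.2.1, st.2.2.2 + 1)
        else st
      else st) ([], [], 0, 0)
  (solveAltAxis acc.1 acc.2.2.1, solveAltAxis acc.2.1 acc.2.2.2)

-- ===== PRECONDITION & SPEC =====
def Spec_solve (p : Int) (q : Int) (points : List (Int × Int × String)) (out : Int × Int) : Prop := out = solve_alt p q points
instance (p : Int) (q : Int) (points : List (Int × Int × String)) (out : Int × Int) : Decidable (Spec_solve p q points out) := by unfold Spec_solve; infer_instance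

-- ===== CLAIM (what is proved, stated in full; the proofs are below) =====
def Claim_equal_solve : Prop := ∀ (p : Int) (q : Int) (points : List (Int × Int × String)), Dom_solve p q points → Spec_solve p q points (solve p q points)

-- ===== LEMMAS AND PROOFS =====

-- A point seen by one axis: (coordinate, tag) with tag 1 = towards-positive (E/N), -1 = towards-negative (W/S), 0 = other axis.
def projAx (c : (Int × Int × String) → Int) (e w : String) (pts : List (Int × Int × String)) : List (Int × Int) :=
  pts.map (fun pt => (c pt, if pt.2.2 = e then (1 : Int) else if pt.2.2 = w then -1 else 0))

-- number of people facing position v on this axis (the value count_x / count_y computes)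
def fAx (l : List (Int × Int)) (v : Int) : Int :=
  (l.map (fun ct => if (ct.2 = 1 ∧ v > ct.1) ∨ (ct.2 = -1 ∧ v < ct.1) then (1 : Int) else 0)).sum

-- B's event / base-contribution of one axis point
def gev (M : Int) (ct : Int × Int) : List (Int × Int) :=
  if ct.2 = 1 then (if ct.1 + 1 ≤ 0 then [] else if ct.1 + 1 ≤ M then [(ct.1 + 1, 1)] else [])
  else if ct.2 = -1 then (if 0 < ct.1 ∧ ct.1 ≤ M then [(ct.1, -1)] else []) else []

def gbs (M : Int) (ct : Int × Int) : Int :=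
  if ct.2 = 1 ∧ ct.1 + 1 ≤ 0 then 1 else if ct.2 = -1 ∧ 0 < ct.1 then 1 else 0

def evl (M : Int) (l : List (Int × Int)) : List (Int × Int) := l.flatMap (gev M)
def bsl (M : Int) (l : List (Int × Int)) : Int := (l.map (gbs M)).sum

def sumLE (v : Int) (ev : List (Int × Int)) : Int :=
  (ev.map (fun kd => if kd.1 ≤ v then kd.2 else 0)).sum
def sumAll (ev : List (Int × Int)) : Int := (ev.map Prod.snd).sum

-- one candidate step of A's loop body, on a single axis
def stepAx (l : List (Int × Int)) (q : Int) (st : Int × Int) (c : Int) : Int × Int :=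
  if 0 ≤ c ∧ c ≤ q then
    if st.2 < fAx l c ∨ (st.2 = fAx l c ∧ st.1 > c) then (c, fAx l c) else st
  else st

def foldA (l : List (Int × Int)) (q : Int) : Int × Int :=
  l.foldl (fun st ct => (PySem.List.pyRange (-1) 2 1).foldl (fun st d => stepAx l q st (ct.1 + d)) st)
    (0, fAx l 0)

def candsA (l : List (Int × Int)) : List Int :=
  l.flatMap (fun ct => (PySem.List.pyRange (-1) 2 1).map (ct.1 + ·))

-- "(pos, cnt) is the min-position argmax of fAx over {0} ∪ (processed in-range candidates)"
def AOpt (l : List (Int × Int)) (q : Int) (P : List Int) (st : Int × Int) : Prop :=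
  (st.1 = 0 ∨ (st.1 ∈ P ∧ 0 ≤ st.1 ∧ st.1 ≤ q)) ∧ st.2 = fAx l st.1 ∧
  ∀ c, (c = 0 ∨ (c ∈ P ∧ 0 ≤ c ∧ c ≤ q)) → fAx l c < st.2 ∨ (fAx l c = st.2 ∧ st.1 ≤ c)

def Closed (r : List (Int × Int)) (v : Int) : Prop := ∀ e ∈ r, e.1 ≠ v

-- ---- A side ----
lemma count_ax_eq (cf : (Int × Int × String) → Int) (e w : String) (hew : e ≠ w)
    (x0 : Int) (pts : List (Int × Int × String)) :
    pts.foldl (fun acc pt => if (pt.2.2 = e ∧ x0 > cf pt) ∨ (pt.2.2 = w ∧ x0 < cf pt) then acc + 1 else acc) 0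
      = fAx (projAx cf e w pts) x0 := by
  suffices h : ∀ acc : Int, pts.foldl (fun acc pt => if (pt.2.2 = e ∧ x0 > cf pt) ∨ (pt.2.2 = w ∧ x0 < cf pt) then acc + 1 else acc) acc
      = acc + fAx (projAx cf e w pts) x0 by
    simpa using h 0
  induction pts with
  | nil => intro acc; simp [fAx, projAx]
  | cons pt tl ih =>
    intro acc
    simp only [List.foldl_cons]
    rw [ih]
    simp only [fAx, projAx, List.map_cons, List.sum_cons]
    by_cases hE : pt.2.2 = e
    · simp only [hE, if_pos rfl]
      have : ¬(e = w) := hew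
      simp [this]
      split_ifs <;> omega
    · by_cases hW : pt.2.2 = w
      · simp only [hW]
        have : ¬(w = e) := fun hh => hew hh.symm
        simp [this]
        split_ifs <;> omega
      · simp [hE, hW, fAx, projAx]

lemma count_x_eq (x0 : Int) (pts : List (Int × Int × String)) :
    count_x x0 pts = fAx (projAx (fun pt => pt.1) "E" "W" pts) x0 := by
  unfold count_x
  exact count_ax_eq (fun pt => pt.1) "E" "W" (by decide) x0 pts

lemma count_y_eq (y0 : Int) (pts : List (Int × Int × String)) :
    count_y y0 pts = fAx (projAx (fun pt => pt.2.1) "N" "S" pts) y0 := by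
  unfold count_y
  exact count_ax_eq (fun pt => pt.2.1) "N" "S" (by decide) y0 pts

lemma foldl_indep {β : Type} (f g : (Int × Int) → β → (Int × Int))
    (comb : (Int × Int × Int × Int) → β → (Int × Int × Int × Int))
    (h : ∀ st e, comb st e =
      ((f (st.1, st.2.2.1) e).1, (g (st.2.1, st.2.2.2) e).1,
       (f (st.1, st.2.2.1) e).2, (g (st.2.1, st.2.2.2) e).2)) :
    ∀ (L : List β) (a b c d : Int), L.foldl comb (a, b, c, d) =
      ((L.foldl f (a, c)).1, (L.foldl g (b, d)).1,
       (L.foldl f (a, c)).2, (L.foldl g (b, d)).2) := by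
  intro L
  induction L with
  | nil => intro a b c d; simp
  | cons e L ih =>
    intro a b c d
    simp only [List.foldl_cons, h]
    rw [ih]

lemma foldA_map (cf : (Int × Int × String) → Int) (e w : String)
    (pts : List (Int × Int × String)) (q : Int) :
    foldA (projAx cf e w pts) q =
      pts.foldl (fun st pt => (PySem.List.pyRange (-1) 2 1).foldl
        (fun st d => stepAx (projAx cf e w pts) q st (cf pt + d)) st)
        (0, fAx (projAx cf e w pts) 0) := by
  unfold foldA
  have key : ∀ (l0 : List (Int × Int)) (init : Int × Int),
      (projAx cf e w pts).foldl (fun st ct => (PySem.List.pyRange (-1) 2 1).foldl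
        (fun st d => stepAx l0 q st (ct.1 + d)) st) init =
      pts.foldl (fun st pt => (PySem.List.pyRange (-1) 2 1).foldl
        (fun st d => stepAx l0 q st (cf pt + d)) st) init := by
    intro l0 init
    rw [show projAx cf e w pts = pts.map
      (fun pt => (cf pt, if pt.2.2 = e then (1 : Int) else if pt.2.2 = w then -1 else 0)) from rfl,
      List.foldl_map]
  exact key _ _

lemma solve_decomp (p q : Int) (pts : List (Int × Int × String)) :
    solve p q pts = ((foldA (projAx (fun pt => pt.1) "E" "W" pts) q).1,
                     (foldA (projAx (fun pt => pt.2.1) "N" "S" pts) q).1) := by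
  unfold solve
  simp only [count_x_eq, count_y_eq]
  rw [foldA_map (fun pt => pt.1) "E" "W" pts q, foldA_map (fun pt => pt.2.1) "N" "S" pts q]
  rw [foldl_indep
      (fun st pt => (PySem.List.pyRange (-1) 2 1).foldl
        (fun st d => stepAx (projAx (fun pt => pt.1) "E" "W" pts) q st (pt.1 + d)) st)
      (fun st pt => (PySem.List.pyRange (-1) 2 1).foldl
        (fun st d => stepAx (projAx (fun pt => pt.2.1) "N" "S" pts) q st (pt.2.1 + d)) st)
      _ ?_ pts 0 0 (fAx (projAx (fun pt => pt.1) "E" "W" pts) 0)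
      (fAx (projAx (fun pt => pt.2.1) "N" "S" pts) 0)]
  intro st pt
  obtain ⟨a, b, c, d2⟩ := st
  rw [foldl_indep
      (fun s d => stepAx (projAx (fun pt => pt.1) "E" "W" pts) q s (pt.1 + d))
      (fun s d => stepAx (projAx (fun pt => pt.2.1) "N" "S" pts) q s (pt.2.1 + d))
      _ ?_ (PySem.List.pyRange (-1) 2 1) a b c d2]
  intro s2 e
  obtain ⟨a2, b2, c2, d3⟩ := s2
  simp only [stepAx]
  split_ifs <;> rfl

lemma aopt_step (l : List (Int × Int)) (q : Int) (P : List Int) (st : Int × Int) (c : Int)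
    (h : AOpt l q P st) : AOpt l q (P ++ [c]) (stepAx l q st c) := by
  obtain ⟨h1, h2, h3⟩ := h
  unfold AOpt stepAx
  split_ifs with hr hu
  · refine ⟨Or.inr ⟨by simp, hr.1, hr.2⟩, rfl, ?_⟩
    intro c' hc'
    rcases hc' with rfl | ⟨hm, hc0, hcq⟩
    · have h0 := h3 0 (Or.inl rfl)
      rcases h0 with h0 | h0 <;> rcases hu with hu | hu <;> omega
    · rcases List.mem_append.1 hm with hP | hsing
      · have h0 := h3 c' (Or.inr ⟨hP, hc0, hcq⟩)
        rcases h0 with h0 | h0 <;> rcases hu with hu | hu <;> omega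
      · have hcc : c' = c := by simpa using hsing
        subst hcc
        right; exact ⟨rfl, le_refl _⟩
  · refine ⟨?_, h2, ?_⟩
    · rcases h1 with h | ⟨hm, h0, hq⟩
      · exact Or.inl h
      · exact Or.inr ⟨List.mem_append_left _ hm, h0, hq⟩
    · intro c' hc'
      rcases hc' with rfl | ⟨hm, hc0, hcq⟩
      · exact h3 0 (Or.inl rfl)
      · rcases List.mem_append.1 hm with hP | hsing
        · exact h3 c' (Or.inr ⟨hP, hc0, hcq⟩)
        · have hcc : c' = c := by simpa using hsing
          subst hcc
          push_neg at hu
          by_cases he : st.2 = fAx l c'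
          · exact Or.inr ⟨he.symm, hu.2 he⟩
          · have := hu.1
            left; omega
  · refine ⟨?_, h2, ?_⟩
    · rcases h1 with h | ⟨hm, h0, hq⟩
      · exact Or.inl h
      · exact Or.inr ⟨List.mem_append_left _ hm, h0, hq⟩
    · intro c' hc'
      rcases hc' with rfl | ⟨hm, hc0, hcq⟩
      · exact h3 0 (Or.inl rfl)
      · rcases List.mem_append.1 hm with hP | hsing
        · exact h3 c' (Or.inr ⟨hP, hc0, hcq⟩)
        · have hcc : c' = c := by simpa using hsing
          subst hcc
          exact absurd ⟨hc0, hcq⟩ hr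

lemma aopt_fold (l : List (Int × Int)) (q : Int) :
    ∀ (cs : List Int) (P : List Int) (st : Int × Int), AOpt l q P st →
      AOpt l q (P ++ cs) (cs.foldl (stepAx l q) st) := by
  intro cs
  induction cs with
  | nil => intro P st h; simpa using h
  | cons c cs ih =>
    intro P st h
    have h2 := ih (P ++ [c]) _ (aopt_step l q P st c h)
    simpa [List.append_assoc] using h2

lemma foldA_eq_cands (l : List (Int × Int)) (q : Int) :
    foldA l q = (candsA l).foldl (stepAx l q) (0, fAx l 0) := by
  unfold foldA candsA
  rw [List.flatMap_def, List.foldl_flatten, List.foldl_map]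
  simp only [List.foldl_map]

lemma foldA_opt (l : List (Int × Int)) (q : Int) : AOpt l q (candsA l) (foldA l q) := by
  have hbase : AOpt l q [] (0, fAx l 0) := by
    refine ⟨Or.inl rfl, rfl, ?_⟩
    intro c hc
    rcases hc with rfl | ⟨hm, _⟩
    · exact Or.inr ⟨rfl, le_refl _⟩
    · simp at hm
  have h := aopt_fold l q (candsA l) [] _ hbase
  rw [foldA_eq_cands]
  simpa using h

-- ---- representation of fAx by events ----
lemma fAx_cons (ct : Int × Int) (l : List (Int × Int)) (v : Int) :
    fAx (ct :: l) v = (if (ct.2 = 1 ∧ v > ct.1) ∨ (ct.2 = -1 ∧ v < ct.1) then 1 else 0) + fAx l v := by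
  simp [fAx]

lemma evl_cons (M : Int) (ct : Int × Int) (l : List (Int × Int)) :
    evl M (ct :: l) = gev M ct ++ evl M l := by simp [evl]

lemma bsl_cons (M : Int) (ct : Int × Int) (l : List (Int × Int)) :
    bsl M (ct :: l) = gbs M ct + bsl M l := by simp [bsl]

lemma sumLE_append' (v : Int) (a b : List (Int × Int)) :
    sumLE v (a ++ b) = sumLE v a + sumLE v b := by simp [sumLE]

lemma fAx_rep (M : Int) (l : List (Int × Int)) (v : Int) (h0 : 0 ≤ v) (hM : v ≤ M) :
    fAx l v = bsl M l + sumLE v (evl M l) := by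
  induction l with
  | nil => simp [fAx, bsl, evl, sumLE]
  | cons ct l ih =>
    rw [fAx_cons, bsl_cons, evl_cons, sumLE_append', ih]
    have hone : (if (ct.2 = 1 ∧ v > ct.1) ∨ (ct.2 = -1 ∧ v < ct.1) then (1 : Int) else 0)
        = gbs M ct + sumLE v (gev M ct) := by
      unfold gbs gev
      by_cases h1 : ct.2 = 1
      · by_cases ha : ct.1 + 1 ≤ 0 <;> by_cases hb : ct.1 + 1 ≤ M <;>
          simp [h1, ha, hb, sumLE] <;> (try split_ifs) <;> omega
      · by_cases h2 : ct.2 = -1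
        · by_cases hc : 0 < ct.1 ∧ ct.1 ≤ M <;>
            simp [h1, h2, hc, sumLE] <;> (try split_ifs) <;> omega
        · simp [h1, h2, sumLE]
    omega

lemma evl_mem (M : Int) (l : List (Int × Int)) :
    ∀ kd ∈ evl M l, 0 < kd.1 ∧ kd.1 ≤ M ∧ ∃ ct ∈ l, kd.1 = ct.1 + 1 ∨ kd.1 = ct.1 := by
  intro kd hkd
  unfold evl at hkd
  rw [List.mem_flatMap] at hkd
  obtain ⟨ct, hct, hin⟩ := hkd
  unfold gev at hin
  split_ifs at hin with h1 h2 h3 h4 h5 <;> simp at hin <;> subst hin <;>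
    refine ⟨by simp <;> omega, by simp <;> omega, ct, hct, by simp⟩

lemma sumLE_stay (ev : List (Int × Int)) (c : Int) (h : ∀ kd ∈ ev, kd.1 ≠ c) :
    sumLE c ev = sumLE (c - 1) ev := by
  unfold sumLE
  congr 1
  apply List.map_congr_left
  intro kd hkd
  have hne := h kd hkd
  split_ifs <;> omega

-- every in-range position's value is realized at a smaller-or-equal event key (or 0)
lemma fAx_real (M : Int) (l : List (Int × Int)) :
    ∀ c, 0 ≤ c → c ≤ M →
      ∃ v, (v = 0 ∨ v ∈ (evl M l).map Prod.fst) ∧ v ≤ c ∧ fAx l c = fAx l v := by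
  have main : ∀ (n : Nat) (c : Int), c.toNat = n → 0 ≤ c → c ≤ M →
      ∃ v, (v = 0 ∨ v ∈ (evl M l).map Prod.fst) ∧ v ≤ c ∧ fAx l c = fAx l v := by
    intro n
    induction n using Nat.strong_induction_on with
    | _ n ih =>
      intro c hn h0 hM
      by_cases hc0 : c = 0
      · exact ⟨0, Or.inl rfl, by omega, by rw [hc0]⟩
      · by_cases hk : c ∈ (evl M l).map Prod.fst
        · exact ⟨c, Or.inr hk, le_refl _, rfl⟩
        · have hstep : fAx l c = fAx l (c - 1) := by
            rw [fAx_rep M l c h0 hM, fAx_rep M l (c - 1) (by omega) (by omega)]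
            have hst := sumLE_stay (evl M l)  c
              (fun kd hkd he => hk (List.mem_map.2 ⟨kd, hkd, he⟩))
            omega
          obtain ⟨v, hv1, hv2, hv3⟩ := ih (c - 1).toNat (by omega) (c - 1) rfl (by omega) (by omega)
          exact ⟨v, hv1, by omega, by rw [hstep, hv3]⟩
  intro c h0 hM
  exact main c.toNat c rfl h0 hM

-- ---- B side ----
lemma sumLE_append (v : Int) (a b : List (Int × Int)) :
    sumLE v (a ++ b) = sumLE v a + sumLE v b := by simp [sumLE]

lemma sumAll_append (a b : List (Int × Int)) : sumAll (a ++ b) = sumAll a + sumAll b := by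
  simp [sumAll]

lemma sumLE_single (v : Int) (e : Int × Int) : sumLE v [e] = if e.1 ≤ v then e.2 else 0 := by
  simp [sumLE]

lemma sumAll_single (e : Int × Int) : sumAll [e] = e.2 := by simp [sumAll]

lemma sumLE_all (t : List (Int × Int)) (k : Int) (h : ∀ e ∈ t, e.1 ≤ k) :
    sumLE k t = sumAll t := by
  unfold sumLE sumAll
  congr 1
  apply List.map_congr_left
  intro e he
  simp [h e he]

lemma sweep_inv (base : Int) :
    ∀ (r t : List (Int × Int)) (cur bp bc : Int),
      (t ++ r).Pairwise (fun a b => a.1 ≤ b.1) →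
      (∀ e ∈ t ++ r, 0 < e.1) →
      cur = base + sumAll t →
      (bp = 0 ∨ bp ∈ t.map Prod.fst) →
      bc = base + sumLE bp t →
      (∀ v, (v = 0 ∨ v ∈ t.map Prod.fst) → Closed r v →
        base + sumLE v t < bc ∨ (base + sumLE v t = bc ∧ bp ≤ v)) →
      Closed r bp →
      ∃ fc, (sweepGo cur bp bc r = 0 ∨ sweepGo cur bp bc r ∈ (t ++ r).map Prod.fst) ∧
        fc = base + sumLE (sweepGo cur bp bc r) (t ++ r) ∧
        ∀ v, (v = 0 ∨ v ∈ (t ++ r).map Prod.fst) →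
          base + sumLE v (t ++ r) < fc ∨ (base + sumLE v (t ++ r) = fc ∧ sweepGo cur bp bc r ≤ v) := by
  intro r
  induction r with
  | nil =>
    intro t cur bp bc hpw hpos hcur hbp hbc hopt hcl
    simp only [sweepGo, List.append_nil]
    exact ⟨bc, hbp, hbc, fun v hv => hopt v hv (fun e he => absurd he (List.not_mem_nil))⟩
  | cons ed r' ih =>
    obtain ⟨k, d⟩ := ed
    intro t cur bp bc hpw hpos hcur hbp hbc hopt hcl
    have hpw' := hpw
    rw [List.pairwise_append] at hpw'
    obtain ⟨hpt, hpr, hcross⟩ := hpw'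
    have hkpos : 0 < k := hpos (k, d) (by simp)
    have htk : ∀ e ∈ t, e.1 ≤ k := fun e he => hcross e he (k, d) (by simp)
    have hr'k : ∀ e ∈ r', k ≤ e.1 := (List.pairwise_cons.1 hpr).1
    have hpr' : r'.Pairwise (fun a b => a.1 ≤ b.1) := (List.pairwise_cons.1 hpr).2
    have hbpk : bp < k := by
      rcases hbp with rfl | hm
      · exact hkpos
      · obtain ⟨e, he, hee⟩ := List.mem_map.1 hm
        have h1 := htk e he
        have h2 := hcl (k, d) (by simp)
        simp at h2
        omega
    have hsplit : t ++ (k, d) :: r' = (t ++ [(k, d)]) ++ r' := by simp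
    have hpw2 : ((t ++ [(k, d)]) ++ r').Pairwise (fun a b => a.1 ≤ b.1) := by
      rw [← hsplit]; exact hpw
    have hpos2 : ∀ e ∈ (t ++ [(k, d)]) ++ r', 0 < e.1 := by
      rw [← hsplit]; exact hpos
    have hcur2 : cur + d = base + sumAll (t ++ [(k, d)]) := by
      rw [sumAll_append, sumAll_single]; omega
    have hFk : base + sumLE k (t ++ [(k, d)]) = cur + d := by
      rw [sumLE_append, sumLE_single]
      simp only [if_pos (le_refl k)]
      rw [sumLE_all t k htk]
      omega
    have hFlt : ∀ v, v < k → sumLE v (t ++ [(k, d)]) = sumLE v t := by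
      intro v hv
      rw [sumLE_append, sumLE_single]
      have : ¬((k, d).1 ≤ v) := by simp; omega
      simp [this]
    have hmem_small : ∀ v, (v = 0 ∨ v ∈ (t ++ [(k, d)]).map Prod.fst) → v ≠ k →
        (v = 0 ∨ v ∈ t.map Prod.fst) ∧ v < k := by
      intro v hv hvk
      rcases hv with rfl | hm
      · exact ⟨Or.inl rfl, hkpos⟩
      · simp only [List.map_append, List.mem_append] at hm
        rcases hm with hm | hm
        · obtain ⟨e, he, hee⟩ := List.mem_map.1 hm
          have := htk e he
          exact ⟨Or.inr hm, by omega⟩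
        · simp at hm
          exact absurd hm hvk
    have hclosed_shift : ∀ v, v < k → Closed r' v → Closed ((k, d) :: r') v := by
      intro v hv hc e he
      rcases List.mem_cons.1 he with rfl | he'
      · simp; omega
      · exact hc e he'
    simp only [sweepGo]
    by_cases hif : ((match r' with | [] => true | e2 :: _ => e2.1 != k) = true ∧ cur + d > bc)
    · rw [if_pos hif]
      have hclr'k : Closed r' k := by
        intro e he
        cases r' with
        | nil => simp at he
        | cons e2 rr =>
          have he2 : e2.1 ≠ k := by
            have h := hif.1
            simpa using h
          rcases List.mem_cons.1 he with rfl | he'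
          · exact he2
          · have h1 := hr'k e (by simp [he'])
            have h2 := hr'k e2 (by simp)
            have h3 := (List.pairwise_cons.1 hpr').1 e he'
            omega
      have hres := ih (t ++ [(k, d)]) (cur + d) k (cur + d) hpw2 hpos2 hcur2
        (Or.inr (by simp)) hFk.symm ?_ hclr'k
      · rw [hsplit]
        exact hres
      · intro v hv hclv
        by_cases hvk : v = k
        · subst hvk
          right; exact ⟨hFk, le_refl _⟩
        · obtain ⟨hvmem, hvlt⟩ := hmem_small v hv hvk
          rw [hFlt v hvlt]
          have hold := hopt v hvmem (hclosed_shift v hvlt hclv)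
          have := hif.2
          left
          rcases hold with h | h <;> omega
    · rw [if_neg hif]
      have hFbp : sumLE bp (t ++ [(k, d)]) = sumLE bp t := hFlt bp hbpk
      have hres := ih (t ++ [(k, d)]) (cur + d) bp bc hpw2 hpos2 hcur2 ?_ ?_ ?_ ?_
      · rw [hsplit]
        exact hres
      · rcases hbp with rfl | hm
        · exact Or.inl rfl
        · right
          simp only [List.map_append, List.mem_append]
          exact Or.inl hm
      · rw [hFbp]; exact hbc
      · intro v hv hclv
        by_cases hvk : v = k
        · have hclosed : (match r' with | [] => true | e2 :: _ => e2.1 != k) = true := by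
            cases r' with
            | nil => rfl
            | cons e2 rr =>
              have h := hclv e2 (by simp)
              rw [hvk] at h
              simpa using h
          have hle : ¬(cur + d > bc) := fun hgt => hif ⟨hclosed, hgt⟩
          rw [hvk, show base + sumLE k (t ++ [(k, d)]) = cur + d from hFk]
          omega
        · obtain ⟨hvmem, hvlt⟩ := hmem_small v hv hvk
          rw [hFlt v hvlt]
          exact hopt v hvmem (hclosed_shift v hvlt hclv)
      · intro e he
        exact hcl e (by simp [he])

lemma acc_decomp (M : Int) (pts : List (Int × Int × String)) :
    ∀ (e1 e2 : List (Int × Int)) (b1 b2 : Int),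
    pts.foldl (fun (st : List (Int × Int) × List (Int × Int) × Int × Int) pt =>
      if pt.2.2 = "E" then
        if pt.1 + 1 ≤ 0 then (st.1, st.2.1, st.2.2.1 + 1, st.2.2.2)
        else if pt.1 + 1 ≤ M then (st.1 ++ [(pt.1 + 1, 1)], st.2.1, st.2.2.1, st.2.2.2)
        else st
      else if pt.2.2 = "W" then
        if pt.1 > 0 then
          if pt.1 ≤ M then (st.1 ++ [(pt.1, -1)], st.2.1, st.2.2.1 + 1, st.2.2.2)
          else (st.1, st.2.1, st.2.2.1 + 1, st.2.2.2)
        else st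
      else if pt.2.2 = "N" then
        if pt.2.1 + 1 ≤ 0 then (st.1, st.2.1, st.2.2.1, st.2.2.2 + 1)
        else if pt.2.1 + 1 ≤ M then (st.1, st.2.1 ++ [(pt.2.1 + 1, 1)], st.2.2.1, st.2.2.2)
        else st
      else if pt.2.2 = "S" then
        if pt.2.1 > 0 then
          if pt.2.1 ≤ M then (st.1, st.2.1 ++ [(pt.2.1, -1)], st.2.2.1, st.2.2.2 + 1)
          else (st.1, st.2.1, st.2.2.1, st.2.2.2 + 1)
        else st
      else st) (e1, e2, b1, b2)
    = (e1 ++ evl M (projAx (fun pt => pt.1) "E" "W" pts),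
       e2 ++ evl M (projAx (fun pt => pt.2.1) "N" "S" pts),
       b1 + bsl M (projAx (fun pt => pt.1) "E" "W" pts),
       b2 + bsl M (projAx (fun pt => pt.2.1) "N" "S" pts)) := by
  induction pts with
  | nil => intro e1 e2 b1 b2; simp [evl, bsl, projAx]
  | cons pt tl ih =>
    intro e1 e2 b1 b2
    have hx : projAx (fun pt => pt.1) "E" "W" (pt :: tl)
        = (pt.1, if pt.2.2 = "E" then (1 : Int) else if pt.2.2 = "W" then -1 else 0)
          :: projAx (fun pt => pt.1) "E" "W" tl := rfl
    have hy : projAx (fun pt => pt.2.1) "N" "S" (pt :: tl)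
        = (pt.2.1, if pt.2.2 = "N" then (1 : Int) else if pt.2.2 = "S" then -1 else 0)
          :: projAx (fun pt => pt.2.1) "N" "S" tl := rfl
    simp only [List.foldl_cons, hx, hy, evl_cons, bsl_cons]
    by_cases hE : pt.2.2 = "E"
    · rw [if_pos hE]
      by_cases h1 : pt.1 + 1 ≤ 0
      · rw [if_pos h1, ih]
        simp only [Prod.mk.injEq]
        refine ⟨?_, ?_, ?_, ?_⟩ <;> simp [gev, gbs, hE, h1, List.append_assoc] <;> omega
      · by_cases h2 : pt.1 + 1 ≤ M
        · rw [if_neg h1, if_pos h2, ih]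
          simp only [Prod.mk.injEq]
          refine ⟨?_, ?_, ?_, ?_⟩ <;> simp [gev, gbs, hE, h1, h2, List.append_assoc] <;> omega
        · rw [if_neg h1, if_neg h2, ih]
          simp only [Prod.mk.injEq]
          refine ⟨?_, ?_, ?_, ?_⟩ <;> simp [gev, gbs, hE, h1, h2, List.append_assoc] <;> omega
    · rw [if_neg hE]
      by_cases hW : pt.2.2 = "W"
      · rw [if_pos hW]
        by_cases h1 : pt.1 > 0
        · by_cases h2 : pt.1 ≤ M
          · rw [if_pos h1, if_pos h2, ih]
            simp only [Prod.mk.injEq]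
            refine ⟨?_, ?_, ?_, ?_⟩ <;>
              simp [gev, gbs, hE, hW, h1, h2, List.append_assoc] <;> omega
          · rw [if_pos h1, if_neg h2, ih]
            simp only [Prod.mk.injEq]
            refine ⟨?_, ?_, ?_, ?_⟩ <;>
              simp [gev, gbs, hE, hW, h1, h2, List.append_assoc] <;> omega
        · rw [if_neg h1, ih]
          simp only [Prod.mk.injEq]
          refine ⟨?_, ?_, ?_, ?_⟩ <;> simp [gev, gbs, hE, hW, h1, List.append_assoc] <;> omega
      · rw [if_neg hW]
        by_cases hN : pt.2.2 = "N"
        · rw [if_pos hN]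
          by_cases h1 : pt.2.1 + 1 ≤ 0
          · rw [if_pos h1, ih]
            simp only [Prod.mk.injEq]
            refine ⟨?_, ?_, ?_, ?_⟩ <;>
              simp [gev, gbs, hE, hW, hN, h1, List.append_assoc] <;> omega
          · by_cases h2 : pt.2.1 + 1 ≤ M
            · rw [if_neg h1, if_pos h2, ih]
              simp only [Prod.mk.injEq]
              refine ⟨?_, ?_, ?_, ?_⟩ <;>
                simp [gev, gbs, hE, hW, hN, h1, h2, List.append_assoc] <;> omega
            · rw [if_neg h1, if_neg h2, ih]
              simp only [Prod.mk.injEq]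
              refine ⟨?_, ?_, ?_, ?_⟩ <;>
                simp [gev, gbs, hE, hW, hN, h1, h2, List.append_assoc] <;> omega
        · rw [if_neg hN]
          by_cases hS : pt.2.2 = "S"
          · rw [if_pos hS]
            by_cases h1 : pt.2.1 > 0
            · by_cases h2 : pt.2.1 ≤ M
              · rw [if_pos h1, if_pos h2, ih]
                simp only [Prod.mk.injEq]
                refine ⟨?_, ?_, ?_, ?_⟩ <;>
                  simp [gev, gbs, hE, hW, hN, hS, h1, h2, List.append_assoc] <;> omega
              · rw [if_pos h1, if_neg h2, ih]
                simp only [Prod.mk.injEq]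
                refine ⟨?_, ?_, ?_, ?_⟩ <;>
                  simp [gev, gbs, hE, hW, hN, hS, h1, h2, List.append_assoc] <;> omega
            · rw [if_neg h1, ih]
              simp only [Prod.mk.injEq]
              refine ⟨?_, ?_, ?_, ?_⟩ <;>
                simp [gev, gbs, hE, hW, hN, hS, h1, List.append_assoc] <;> omega
          · rw [if_neg hS, ih]
            simp only [Prod.mk.injEq]
            refine ⟨?_, ?_, ?_, ?_⟩ <;>
              simp [gev, gbs, hE, hW, hN, hS, List.append_assoc] <;> omega

lemma solve_alt_decomp (p q : Int) (pts : List (Int × Int × String)) :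
    solve_alt p q pts =
      (solveAltAxis (evl (if q > 0 then q else 0) (projAx (fun pt => pt.1) "E" "W" pts))
                    (bsl (if q > 0 then q else 0) (projAx (fun pt => pt.1) "E" "W" pts)),
       solveAltAxis (evl (if q > 0 then q else 0) (projAx (fun pt => pt.2.1) "N" "S" pts))
                    (bsl (if q > 0 then q else 0) (projAx (fun pt => pt.2.1) "N" "S" pts))) := by
  simp only [solve_alt]
  rw [acc_decomp (if q > 0 then q else 0) pts [] [] 0 0]
  simp

-- ---- the per-axis equivalence ----
lemma axis_eq (q : Int) (l : List (Int × Int)) :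
    (foldA l q).1 = solveAltAxis (evl (if q > 0 then q else 0) l) (bsl (if q > 0 then q else 0) l) := by
  set M := if q > 0 then q else 0 with hMdef
  have hM0 : 0 ≤ M := by rw [hMdef]; split_ifs <;> omega
  have hqM : ∀ x : Int, x ≤ q → x ≤ M := by intro x; rw [hMdef]; split_ifs <;> omega
  have hMq : ∀ x : Int, 0 < x → x ≤ M → x ≤ q := by
    intro x h1 h2; rw [hMdef] at h2; split_ifs at h2 <;> omega
  obtain ⟨ha1, ha2, ha3⟩ := foldA_opt l q
  set s := PySem.List.sorted (evl M l) Prod.fst false with hsdef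
  have hperm : s.Perm (evl M l) := PySem.List.sorted_perm (evl M l) Prod.fst false
  have hpw : s.Pairwise (fun a b => a.1 ≤ b.1) := PySem.List.sorted_pairwise (evl M l) Prod.fst
  have hkeys : ∀ e ∈ s, 0 < e.1 := fun e he => (evl_mem M l e (hperm.mem_iff.1 he)).1
  have hsum : ∀ v, sumLE v s = sumLE v (evl M l) := by
    intro v
    unfold sumLE
    exact (hperm.map (fun kd => if kd.1 ≤ v then kd.2 else 0)).sum_eq
  have hOPT0 : ∀ v, (v = 0 ∨ v ∈ (List.map Prod.fst ([] : List (Int × Int)))) → Closed s v →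
      bsl M l + sumLE v ([] : List (Int × Int)) < bsl M l ∨
        (bsl M l + sumLE v ([] : List (Int × Int)) = bsl M l ∧ (0 : Int) ≤ v) := by
    intro v hv _
    rcases hv with rfl | hm
    · right; exact ⟨by simp [sumLE], le_refl _⟩
    · simp at hm
  have hCL0 : Closed s 0 := by intro e he; have := hkeys e he; omega
  obtain ⟨fc, hb1, hb2, hb3⟩ := sweep_inv (bsl M l) s [] (bsl M l) 0 (bsl M l)
    (by simpa using hpw) (by simpa using hkeys) (by simp [sumAll]) (Or.inl rfl)
    (by simp [sumLE]) hOPT0 hCL0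
  simp only [List.nil_append] at hb1 hb2 hb3
  have hgoalB : solveAltAxis (evl M l) (bsl M l) = sweepGo (bsl M l) 0 (bsl M l) s := rfl
  have hkeyrange : ∀ v, v ∈ s.map Prod.fst → 0 < v ∧ v ≤ M := by
    intro v hv
    obtain ⟨e, he, rfl⟩ := List.mem_map.1 hv
    have h := evl_mem M l e (hperm.mem_iff.1 he)
    exact ⟨h.1, h.2.1⟩
  have hrep : ∀ v, 0 ≤ v → v ≤ M → bsl M l + sumLE v s = fAx l v := by
    intro v h1 h2
    rw [hsum v, ← fAx_rep M l v h1 h2]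
  have hpbrange : 0 ≤ sweepGo (bsl M l) 0 (bsl M l) s ∧ sweepGo (bsl M l) 0 (bsl M l) s ≤ M := by
    rcases hb1 with h | h
    · rw [h]; exact ⟨le_refl 0, hM0⟩
    · have := hkeyrange _ h; exact ⟨by omega, this.2⟩
  have hfc : fc = fAx l (sweepGo (bsl M l) 0 (bsl M l) s) := by
    rw [hb2, hrep _ hpbrange.1 hpbrange.2]
  have hparange : 0 ≤ (foldA l q).1 ∧ (foldA l q).1 ≤ M := by
    rcases ha1 with h | h
    · rw [h]; exact ⟨le_refl 0, hM0⟩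
    · exact ⟨h.2.1, hqM _ h.2.2⟩
  obtain ⟨v, hv1, hv2, hv3⟩ := fAx_real M l (foldA l q).1 hparange.1 hparange.2
  have hrange3 : PySem.List.pyRange (-1) 2 1 = [-1, 0, 1] := by decide
  have hkeycand : ∀ x, x ∈ (evl M l).map Prod.fst → x ∈ candsA l ∧ 0 ≤ x ∧ x ≤ q := by
    intro x hx
    obtain ⟨e, he, rfl⟩ := List.mem_map.1 hx
    obtain ⟨hpos, hle, ct, hct, hor⟩ := evl_mem M l e he
    have hq : e.1 ≤ q := hMq e.1 hpos hle
    refine ⟨?_, by omega, hq⟩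
    unfold candsA
    rw [List.mem_flatMap]
    refine ⟨ct, hct, ?_⟩
    rw [hrange3, List.mem_map]
    rcases hor with h | h
    · exact ⟨1, by simp, by omega⟩
    · exact ⟨0, by simp, by omega⟩
  have hsmem : ∀ x : Int, x ∈ s.map Prod.fst ↔ x ∈ (evl M l).map Prod.fst :=
    fun x => (hperm.map Prod.fst).mem_iff
  have hApb : fAx l (sweepGo (bsl M l) 0 (bsl M l) s) < (foldA l q).2 ∨
      (fAx l (sweepGo (bsl M l) 0 (bsl M l) s) = (foldA l q).2 ∧
        (foldA l q).1 ≤ sweepGo (bsl M l) 0 (bsl M l) s) := by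
    rcases hb1 with h | h
    · rw [h]; exact ha3 0 (Or.inl rfl)
    · exact ha3 _ (Or.inr (hkeycand _ ((hsmem _).1 h)))
  have hBv : fAx l v < fc ∨ (fAx l v = fc ∧ sweepGo (bsl M l) 0 (bsl M l) s ≤ v) := by
    have hvr : 0 ≤ v ∧ v ≤ M := by
      rcases hv1 with h | h
      · constructor <;> omega
      · have := hkeyrange v ((hsmem v).2 h)
        exact ⟨by omega, this.2⟩
    have h := hb3 v (by
      rcases hv1 with h | h
      · exact Or.inl h
      · exact Or.inr ((hsmem v).2 h))
    rwa [hrep v hvr.1 hvr.2] at h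
  rw [hgoalB]
  have hma : (foldA l q).2 = fAx l (foldA l q).1 := ha2
  omega

-- ===== VERDICT (by name: the statement is the Claim_ definition above) =====
theorem solve_spec : Claim_equal_solve := by
  intro p q pts _
  unfold Spec_solve
  rw [solve_decomp, solve_alt_decomp, axis_eq, axis_eq]
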